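-- pv_equiv track=rewrite | github.com/eoinmurray/pinglab | src/scripts/validate-notebook.py | iter_body_lines
-- ===== SOURCE A (Python) =====
-- def iter_body_lines(lines: list[str]):
--     """Yield (lineno, line) skipping fenced code blocks. lineno is 1-based
--     against the original file (approximate: frontmatter-offset lines not
--     tracked here, caller adjusts if needed)."""
--     in_code = False
--     for i, line in enumerate(lines, start=1):
--         if line.startswith("```"):
--             in_code = not in_code
--             continue
--         if in_code:
--             continue
--         yield i, line
-- ===== SOURCE B (Python) =====
-- def iter_body_lines(lines):
--     """Index-first reimplementation: collect fence line numbers, build the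
--     excluded set of line numbers (fences plus interiors of fenced blocks,
--     an unclosed trailing fence excluding through end-of-file), then yield
--     the remaining (lineno, line) pairs in order."""
--     fences = [i for i, line in enumerate(lines, start=1) if line.startswith("```")]
--     excluded = set(fences)
--     rest = fences
--     while rest:
--         start = rest[0]
--         end = rest[1] if len(rest) > 1 else len(lines) + 1
--         excluded.update(range(start, end))
--         rest = rest[2:]
--     for i, line in enumerate(lines, start=1):
--         if i not in excluded:
--             yield i, line
-- ===== Notes on version B (the rewrite author's own statement) =====
-- stated objective: alternative
-- what changed: Instead of A's single pass with a toggled in_code flag, B first collects the 1-based indices of all fence lines, walks those indices pairwise to build the excluded set of line numbers (fences plus block interiors, an unclosed trailing fence excluding through end-of-file), and then emits every enumerated line whose number is not in that set.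
import Mathlib
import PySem

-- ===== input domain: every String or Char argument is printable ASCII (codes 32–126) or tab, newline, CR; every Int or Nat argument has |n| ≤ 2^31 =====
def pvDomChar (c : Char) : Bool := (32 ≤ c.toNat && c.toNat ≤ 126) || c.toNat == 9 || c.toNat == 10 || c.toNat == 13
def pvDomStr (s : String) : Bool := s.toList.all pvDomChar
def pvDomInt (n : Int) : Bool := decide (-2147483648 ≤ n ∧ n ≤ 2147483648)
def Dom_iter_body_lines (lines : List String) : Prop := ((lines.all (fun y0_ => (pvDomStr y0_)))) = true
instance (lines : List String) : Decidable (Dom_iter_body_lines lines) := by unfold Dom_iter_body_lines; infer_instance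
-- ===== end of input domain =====

-- B replaces A's toggled in_code flag with an index-first pass: collect fence line numbers,
-- build the excluded set of line numbers by walking the fences pairwise, then filter the
-- enumeration (alternative decomposition, same O(n) cost; A's generator is ported as the
-- list of pairs it yields).

-- ===== PORT A =====
def pvFence (l : String) : Bool := PySem.Str.startswith l "```"

-- the 'for i, line in enumerate(lines, start=1)' loop with its in_code flag
def pvALoop (c : Bool) (i : Int) : List String → List (Int × String)
  | [] => []
  | l :: ls =>
    if pvFence l then pvALoop (!c) (i + 1) ls
    else if c then pvALoop c (i + 1) ls
    else (i, l) :: pvALoop c (i + 1) ls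

def iter_body_lines (lines : List String) : List (Int × String) :=
  pvALoop false 1 lines

-- ===== PORT B =====
-- '[i for i, line in enumerate(lines, start=1) if line.startswith("```")]', element by element
def pvBFences (i : Int) : List String → List Int
  | [] => []
  | l :: ls => if pvFence l then i :: pvBFences (i + 1) ls else pvBFences (i + 1) ls

-- the 'while rest: ... excluded.update(range(start, end)); rest = rest[2:]' loop
def pvBWalk (n1 : Int) (excl : PySem.Set Int) : List Int → PySem.Set Int
  | [] => excl
  | [s] => PySem.Set.update excl (PySem.List.pyRange s n1)
  | s :: e :: rest => pvBWalk n1 (PySem.Set.update excl (PySem.List.pyRange s e)) rest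

-- the final 'for i, line in enumerate(lines, start=1): if i not in excluded: yield i, line'
def pvBEmit (excl : PySem.Set Int) (i : Int) : List String → List (Int × String)
  | [] => []
  | l :: ls =>
    if PySem.Set.contains excl i then pvBEmit excl (i + 1) ls
    else (i, l) :: pvBEmit excl (i + 1) ls

def iter_body_lines_alt (lines : List String) : List (Int × String) :=
  let fences := pvBFences 1 lines
  let excluded := pvBWalk ((lines.length : Int) + 1) (PySem.Set.ofList fences) fences
  pvBEmit excluded 1 lines

-- ===== PRECONDITION & SPEC =====
def Spec_iter_body_lines (lines : List String) (out : List (Int × String)) : Prop := out = iter_body_lines_alt lines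
instance (lines : List String) (out : List (Int × String)) : Decidable (Spec_iter_body_lines lines out) := by unfold Spec_iter_body_lines; infer_instance

-- ===== CLAIM (what is proved, stated in full; the proofs are below) =====
def Claim_equal_iter_body_lines : Prop := ∀ (lines : List String), Dom_iter_body_lines lines → Spec_iter_body_lines lines (iter_body_lines lines)

-- ===== LEMMAS AND PROOFS =====

-- whether A's loop skips the line k positions into the remaining list, given flag c
def pvSkip (c : Bool) : List String → Nat → Bool
  | [], _ => false
  | l :: _, 0 => pvFence l || c
  | l :: ls, k + 1 => pvSkip (if pvFence l then !c else c) ls k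

-- the line numbers pvBWalk adds, as a plain list
def pvCover : List Int → Int → List Int
  | [], _ => []
  | [s], n1 => PySem.List.pyRange s n1
  | s :: e :: rest, n1 => PySem.List.pyRange s e ++ pvCover rest n1

theorem pvCover_cons (s : Int) (F : List Int) (n1 : Int) :
    pvCover (s :: F) n1 = PySem.List.pyRange s (F.headD n1) ++ pvCover (F.drop 1) n1 := by
  cases F <;> simp [pvCover]

theorem mem_bWalk : ∀ (fs : List Int) (n1 : Int) (excl : PySem.Set Int) (j : Int),
    j ∈ pvBWalk n1 excl fs ↔ j ∈ excl ∨ j ∈ pvCover fs n1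
  | [], n1, excl, j => by simp [pvBWalk, pvCover]
  | [s], n1, excl, j => by
      simp [pvBWalk, pvCover, PySem.Set.mem_update]
  | s :: e :: rest, n1, excl, j => by
      rw [pvBWalk, pvCover, mem_bWalk rest n1]
      simp [PySem.Set.mem_update]
      tauto

theorem pvBFences_ge : ∀ (ls : List String) (i x : Int), x ∈ pvBFences i ls → i ≤ x := by
  intro ls
  induction ls with
  | nil => intro i x h; simp [pvBFences] at h
  | cons l ls ih =>
      intro i x h
      by_cases hf : pvFence l
      · simp [pvBFences, hf] at h
        rcases h with h | h
        · omega
        · have := ih (i + 1) x h; omega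
      · simp [pvBFences, hf] at h
        have := ih (i + 1) x h; omega

theorem pvCover_lb : ∀ (fs : List Int) (n1 x : Int), x ∈ pvCover fs n1 → ∃ s ∈ fs, s ≤ x
  | [], n1, x => by simp [pvCover]
  | [s], n1, x => by
      simp [pvCover, PySem.List.mem_pyRange_one]
      intro h _; exact h
  | s :: e :: rest, n1, x => by
      intro h
      simp [pvCover, PySem.List.mem_pyRange_one] at h
      rcases h with ⟨h, _⟩ | h
      · exact ⟨s, by simp, h⟩
      · obtain ⟨t, ht, hle⟩ := pvCover_lb rest n1 x h
        exact ⟨t, by simp [ht], hle⟩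

-- the membership predicate B's excluded set realises on the remaining lines:
-- c = false: fences of the suffix plus their paired interiors;
-- c = true: additionally everything from lo up to the next closing fence (or n1)
def pvP (c : Bool) (lo : Int) (F : List Int) (n1 j : Int) : Prop :=
  if c then (j ∈ F ∨ j ∈ PySem.List.pyRange lo (F.headD n1) ∨ j ∈ pvCover (F.drop 1) n1)
  else (j ∈ F ∨ j ∈ pvCover F n1)

theorem pvP_false (lo : Int) (F : List Int) (n1 j : Int) :
    pvP false lo F n1 j ↔ (j ∈ F ∨ j ∈ pvCover F n1) := by simp [pvP]

theorem pvP_true (lo : Int) (F : List Int) (n1 j : Int) :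
    pvP true lo F n1 j ↔
      (j ∈ F ∨ j ∈ PySem.List.pyRange lo (F.headD n1) ∨ j ∈ pvCover (F.drop 1) n1) := by
  simp [pvP]

theorem pvMain : ∀ (ls : List String) (c : Bool) (i lo n1 : Int),
    n1 = i + ls.length → lo ≤ i → ∀ k : Nat, k < ls.length →
    (pvP c lo (pvBFences i ls) n1 (i + k) ↔ pvSkip c ls k = true) := by
  intro ls
  induction ls with
  | nil => intro c i lo n1 hn hlo k hk; simp at hk
  | cons l ls ih =>
      intro c i lo n1 hn hlo k hk
      have hn' : n1 = (i + 1) + ls.length := by simp at hn; omega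
      by_cases hf : pvFence l
      · -- fence line: fences = i :: rest
        have hF : pvBFences i (l :: ls) = i :: pvBFences (i + 1) ls := by simp [pvBFences, hf]
        cases k with
        | zero =>
            simp only [pvSkip, hf, Bool.true_or, hF]
            unfold pvP
            split <;> simp
        | succ k =>
            have hk' : k < ls.length := by simp at hk; omega
            have hj : i + ((k + 1 : Nat) : Int) = (i + 1) + (k : Int) := by push_cast; ring
            rw [hF, hj]
            simp only [pvSkip, hf, if_true]
            cases c with
            | false =>
                simp only [Bool.not_false]
                rw [pvP_false, pvCover_cons, ← ih true (i + 1) i n1 hn' (by omega) k hk',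
                  pvP_true]
                simp only [List.mem_cons, List.mem_append]
                have hne : ¬((i + 1) + (k : Int) = i) := by omega
                tauto
            | true =>
                simp only [Bool.not_true]
                rw [pvP_true, ← ih false (i + 1) lo n1 hn' (by omega) k hk', pvP_false]
                simp only [List.headD_cons, List.drop_one, List.tail_cons, List.mem_cons,
                  PySem.List.mem_pyRange_one]
                have hne : ¬((i + 1) + (k : Int) = i) := by omega
                have hlt : ¬(lo ≤ (i + 1) + (k : Int) ∧ (i + 1) + (k : Int) < i) := by omega
                tauto
      · -- non-fence line: fences unchanged
        have hfl : pvFence l = false := by simpa using hf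
        have hF : pvBFences i (l :: ls) = pvBFences (i + 1) ls := by simp [pvBFences, hf]
        cases k with
        | zero =>
            have hge : ∀ x ∈ pvBFences (i + 1) ls, i + 1 ≤ x :=
              fun x hx => pvBFences_ge ls (i + 1) x hx
            have h0 : pvSkip c (l :: ls) 0 = (pvFence l || c) := rfl
            have hz : i + ((0 : Nat) : Int) = i := by simp
            rw [h0, hfl, Bool.false_or, hF, hz]
            cases c with
            | false =>
                rw [pvP_false]
                refine iff_of_false ?_ (by simp)
                rintro (h | h)
                · have := hge _ h; omega
                · obtain ⟨s, hs, hle⟩ := pvCover_lb _ _ _ h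
                  have := hge s hs; omega
            | true =>
                rw [pvP_true]
                refine iff_of_true (Or.inr (Or.inl ?_)) rfl
                rw [PySem.List.mem_pyRange_one]
                refine ⟨hlo, ?_⟩
                cases hFe : pvBFences (i + 1) ls with
                | nil => simp only [List.headD_nil]; omega
                | cons e rest =>
                    simp only [List.headD_cons]
                    have := pvBFences_ge ls (i + 1) e (by simp [hFe]); omega
        | succ k =>
            have hk' : k < ls.length := by simp at hk; omega
            have hj : i + ((k + 1 : Nat) : Int) = (i + 1) + (k : Int) := by push_cast; ring
            simp only [pvSkip, hf, hF, hj]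
            exact ih c (i + 1) lo n1 hn' (by omega) k hk'

theorem pvContains_eq (E : PySem.Set Int) (j : Int) :
    PySem.Set.contains E j = decide (j ∈ E) := by
  simp [PySem.Set.contains]

theorem pvBEmit_eq_aLoop : ∀ (ls : List String) (c : Bool) (i : Int) (E : PySem.Set Int),
    (∀ k : Nat, k < ls.length → PySem.Set.contains E (i + k) = pvSkip c ls k) →
    pvBEmit E i ls = pvALoop c i ls := by
  intro ls
  induction ls with
  | nil => intro c i E _; simp [pvBEmit, pvALoop]
  | cons l ls ih =>
      intro c i E h
      have h0 : decide (i ∈ E) = (pvFence l || c) := by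
        have := h 0 (by simp)
        rw [pvContains_eq] at this
        simpa [pvSkip] using this
      have htail : ∀ k : Nat, k < ls.length →
          PySem.Set.contains E ((i + 1) + k) = pvSkip (if pvFence l then !c else c) ls k := by
        intro k hk
        have := h (k + 1) (by simp; omega)
        have hj : i + ((k + 1 : Nat) : Int) = (i + 1) + (k : Int) := by push_cast; ring
        rw [hj] at this
        simpa [pvSkip] using this
      by_cases hf : pvFence l
      · have hmem : i ∈ E := of_decide_eq_true (by rw [h0, hf]; simp)
        have hrec := ih (!c) (i + 1) E (by simpa [hf] using htail)
        cases c <;> simp [pvBEmit, pvALoop, hf, hmem, hrec]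
      · have hfl : pvFence l = false := by simpa using hf
        cases c with
        | false =>
            have hnm : i ∉ E := of_decide_eq_false (by rw [h0, hfl]; simp)
            have hrec := ih false (i + 1) E (by simpa [hfl] using htail)
            simp [pvBEmit, pvALoop, hfl, hnm, hrec]
        | true =>
            have hmem : i ∈ E := of_decide_eq_true (by rw [h0, hfl]; simp)
            have hrec := ih true (i + 1) E (by simpa [hfl] using htail)
            simp [pvBEmit, pvALoop, hfl, hmem, hrec]

-- ===== VERDICT (by name: the statement is the Claim_ definition above) =====
theorem iter_body_lines_spec : Claim_equal_iter_body_lines := by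
  unfold Claim_equal_iter_body_lines Spec_iter_body_lines
  intro lines _
  unfold iter_body_lines iter_body_lines_alt
  refine (pvBEmit_eq_aLoop lines false 1 _ ?_).symm
  intro k hk
  rw [pvContains_eq]
  refine Bool.eq_iff_iff.mpr ?_
  rw [decide_eq_true_iff, mem_bWalk, PySem.Set.mem_ofList]
  have hmain := pvMain lines false 1 1 ((lines.length : Int) + 1)
    (by ring) (by omega) k hk
  rw [pvP_false] at hmain
  exact hmain
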